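-- pv_equiv track=rewrite | github.com/Akshat-07-ux/GfG-Questions | Difficulty: Easy/Minimum Operations/minimum-operations.py | minOperation
-- ===== SOURCE A (Python) =====
-- def minOperation(n):
--    # Initialize the number of operations
--    operations = 0
--
--    # Start from N and work backwards towards 0
--    while n > 0:
--        # If the number is even, divide by 2 (reverse of doubling)
--        if n % 2 == 0:
--            n //= 2
--        # If the number is odd, subtract 1 (reverse of adding 1)
--        else:
--            n -= 1
--        # Increment the count of operations
--        operations += 1
--
--    return operations
-- ===== SOURCE B (Python) =====
-- def minOperation(n):
--     if n <= 0:
--         return 0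
--     return (n.bit_length() - 1) + bin(n).count('1')
-- ===== Notes on version B (the rewrite author's own statement) =====
-- stated objective: simpler
-- what changed: The while loop simulating halve/decrement steps is replaced by a closed form read off the binary representation: (bit_length - 1) halvings plus one subtraction per set bit.
import Mathlib
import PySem

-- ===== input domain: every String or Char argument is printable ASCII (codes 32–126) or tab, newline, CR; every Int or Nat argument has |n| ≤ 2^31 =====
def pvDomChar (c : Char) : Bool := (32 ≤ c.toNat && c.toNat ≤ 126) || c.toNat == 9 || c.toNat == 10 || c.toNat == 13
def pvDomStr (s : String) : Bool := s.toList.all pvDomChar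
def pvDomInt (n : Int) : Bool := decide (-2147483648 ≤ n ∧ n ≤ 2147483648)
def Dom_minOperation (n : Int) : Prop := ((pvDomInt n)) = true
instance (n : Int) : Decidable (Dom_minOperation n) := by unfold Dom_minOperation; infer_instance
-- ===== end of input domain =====

-- B replaces A's step-by-step halve/decrement loop by the closed form
-- (bit_length - 1) + popcount, read directly off the binary representation (objective: simpler).

-- ===== PORT A =====
-- the while loop of A, state (n, operations)
def minOpGo (n : Int) (operations : Int) : Int :=
  if h : n > 0 then
    if n % 2 = 0 then minOpGo (PySem.Int.floordiv n 2) (operations + 1)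
    else minOpGo (n - 1) (operations + 1)
  else operations
termination_by n.toNat
decreasing_by
  · have : PySem.Int.floordiv n 2 = n / 2 := by
      simp [PySem.Int.floordiv, Int.fdiv_eq_ediv]
    rw [this]; omega
  · omega

def minOperation (n : Int) : Int := minOpGo n 0

-- ===== PORT B =====
-- n.bit_length() for n ≥ 0
def pvBitLen : Nat → Nat
  | 0 => 0
  | m + 1 => pvBitLen ((m + 1) / 2) + 1
decreasing_by omega

-- bin(n).count('1') for n ≥ 0
def pvPopcount : Nat → Nat
  | 0 => 0
  | m + 1 => pvPopcount ((m + 1) / 2) + (m + 1) % 2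
decreasing_by omega

def minOperation_alt (n : Int) : Int :=
  if n ≤ 0 then 0
  else ((pvBitLen n.toNat : Int) - 1) + (pvPopcount n.toNat : Int)

-- ===== PRECONDITION & SPEC =====
def Spec_minOperation (n : Int) (out : Int) : Prop := out = minOperation_alt n
instance (n : Int) (out : Int) : Decidable (Spec_minOperation n out) := by unfold Spec_minOperation; infer_instance

-- ===== CLAIM (what is proved, stated in full; the proofs are below) =====
def Claim_equal_minOperation : Prop := ∀ (n : Int), Dom_minOperation n → Spec_minOperation n (minOperation n)

-- ===== LEMMAS AND PROOFS =====

lemma pvBitLen_two_mul (k : Nat) (hk : 1 ≤ k) : pvBitLen (2 * k) = pvBitLen k + 1 := by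
  obtain ⟨j, rfl⟩ := Nat.exists_eq_add_of_le hk
  rw [show 2 * (1 + j) = (2 * j + 1) + 1 by ring, pvBitLen]
  congr 1; congr 1; omega

lemma pvBitLen_two_mul_add_one (k : Nat) : pvBitLen (2 * k + 1) = pvBitLen k + 1 := by
  rw [show 2 * k + 1 = (2 * k) + 1 from rfl, pvBitLen]
  congr 1; congr 1; omega

lemma pvPopcount_two_mul (k : Nat) (hk : 1 ≤ k) : pvPopcount (2 * k) = pvPopcount k := by
  obtain ⟨j, rfl⟩ := Nat.exists_eq_add_of_le hk
  rw [show 2 * (1 + j) = (2 * j + 1) + 1 by ring, pvPopcount]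
  have h1 : ((2 * j + 1) + 1) / 2 = 1 + j := by omega
  have h2 : ((2 * j + 1) + 1) % 2 = 0 := by omega
  rw [h1, h2]; simp

lemma pvPopcount_two_mul_add_one (k : Nat) : pvPopcount (2 * k + 1) = pvPopcount k + 1 := by
  rw [show 2 * k + 1 = (2 * k) + 1 from rfl, pvPopcount]
  have h1 : (2 * k + 1) / 2 = k := by omega
  have h2 : (2 * k + 1) % 2 = 1 := by omega
  rw [h1, h2]

lemma pvBitLen_pos (m : Nat) (hm : 1 ≤ m) : 1 ≤ pvBitLen m := by
  obtain ⟨j, rfl⟩ := Nat.exists_eq_add_of_le hm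
  rw [show 1 + j = j + 1 from by omega, pvBitLen]; omega

-- the closed form, over Nat
def pvC (m : Nat) : Int := ((pvBitLen m : Int) - 1) + (pvPopcount m : Int)

lemma minOpGo_closed (m : Nat) : ∀ ops : Int,
    minOpGo (m : Int) ops = ops + (if m = 0 then 0 else pvC m) := by
  induction m using Nat.strong_induction_on with
  | _ m ih =>
    intro ops
    rcases Nat.eq_zero_or_pos m with h0 | hpos
    · subst h0; rw [minOpGo]; simp
    · rw [minOpGo]
      have hgt : (m : Int) > 0 := by exact_mod_cast hpos
      rw [dif_pos hgt]
      rcases Nat.even_or_odd m with ⟨k, hk⟩ | ⟨k, hk⟩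
      · -- even, m = 2k with k ≥ 1
        have hk' : m = 2 * k := by omega
        have hk1 : 1 ≤ k := by omega
        have hmod : (m : Int) % 2 = 0 := by omega
        rw [if_pos hmod]
        have hfd : PySem.Int.floordiv (m : Int) 2 = (k : Int) := by
          simp [PySem.Int.floordiv, Int.fdiv_eq_ediv]; omega
        rw [hfd, ih k (by omega) (ops + 1)]
        rw [if_neg (by omega), if_neg (by omega)]
        have hb := pvBitLen_two_mul k hk1
        have hp := pvPopcount_two_mul k hk1
        have hbp := pvBitLen_pos k hk1
        simp only [pvC, hk', hb, hp]
        push_cast; omega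
      · -- odd, m = 2k + 1
        have hk' : m = 2 * k + 1 := by omega
        have hmod : ¬ ((m : Int) % 2 = 0) := by omega
        rw [if_neg hmod]
        have hsub : (m : Int) - 1 = ((2 * k : Nat) : Int) := by push_cast; omega
        rw [hsub, ih (2 * k) (by omega) (ops + 1)]
        have hb := pvBitLen_two_mul_add_one k
        have hp := pvPopcount_two_mul_add_one k
        rcases Nat.eq_zero_or_pos k with hk0 | hk1
        · subst hk0
          rw [if_pos (by omega)]
          simp only [pvC, hk']
          simp [pvBitLen, pvPopcount]
        · rw [if_neg (by omega)]
          have hb2 := pvBitLen_two_mul k hk1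
          have hp2 := pvPopcount_two_mul k hk1
          simp only [pvC, hk', hb, hp, hb2, hp2]
          push_cast; omega

-- ===== VERDICT (by name: the statement is the Claim_ definition above) =====
theorem minOperation_spec : Claim_equal_minOperation := by
  intro n _
  unfold Spec_minOperation minOperation minOperation_alt
  by_cases hle : n ≤ 0
  · rw [minOpGo, dif_neg (by omega), if_pos hle]
  · obtain ⟨m, rfl⟩ : ∃ m : Nat, n = (m : Int) := ⟨n.toNat, by omega⟩
    rw [if_neg (by omega), minOpGo_closed m 0, if_neg (by omega)]
    simp [pvC]
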